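/- GENERATED by farm/mkstatement.py from design/units.tsv (unit `start_decoder.C9a`) and the assertions of Vorbis/Spec/StartDecoderC9.lean — do not edit.
   THE STATEMENT of the proof unit `start_decoder.C9a`: segment C9a of `start_decoder` (2 instructions; entries 0x114724;
   exits 0x11472c; ranges 0x114724-0x114727)
   takes each of its entry assertions to one of its exit assertions (`Vorbis.Spec.StartDecoder.SegC9a`), given the contracts of its callees.
   What the names mean: Vorbis/Spec/Basic.lean (the shared hypotheses), Vorbis/Spec/StartDecoderC9.lean (the assertions). The theorem to prove:
   `theorem start_decoder_C9a_ok : Vorbis.Spec.start_decoder_C9a.Statement`. -/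
import Vorbis.Spec.Codebook
import Vorbis.Spec.StartDecoderC9
namespace Vorbis.Spec.start_decoder_C9a
open X86 X86.User Asan

/-- The statement of unit `start_decoder.C9a`. -/
def Statement : Prop :=
  ∀ (Lay : Layout) (_hLay : Lay.hi = 0x1000000) (μ : Microarch) (_hμ : UserX.MicroOK μ) (u₀ : State)
    (_hcode : HasCodeNat Lay u₀ Vorbis.L.start_decoder.entry Vorbis.Code.code_start_decoder.nat Vorbis.L.start_decoder.size)
    (_h_compute_accelerated_huffman : ∀ (others : List Obj) (frames : List (Nat × FrameLayout)) (Blk : Block → Prop), Calls Lay μ Vorbis.WayInv (Vorbis.conv u₀) Vorbis.L.compute_accelerated_huffman.entry (Vorbis.Spec.compute_accelerated_huffman.spec others frames Blk)),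
    Vorbis.Spec.StartDecoder.SegC9a Lay μ u₀

end Vorbis.Spec.start_decoder_C9a
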